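-- pv_equiv track=rewrite | github.com/pubgeo/wriva-cvgl-baseline | models/flex_geo_match_dinov3_posloss_v2.py | infer_pos_head_variant_from_state
-- ===== SOURCE A (Python) =====
-- from typing import List, Tuple, Dict, Any, Optional, Set
--
-- POS_HEAD_VARIANT = "pairwise_residual"  # "legacy_mlp" | "pairwise_residual" | "sat_token_heatmap"
--
-- def infer_pos_head_variant_from_state(state: Dict[str, Any], default: str = POS_HEAD_VARIANT) -> str:
--     if not isinstance(state, dict):
--         return str(default)
--     keys = set(state.keys())
--     if any(k.startswith("pos_head.query_proj.") for k in keys):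
--         return "sat_token_heatmap"
--     if any(k.startswith("pos_head.input_proj.") for k in keys):
--         return "pairwise_residual"
--     if "pos_head.0.weight" in keys or "pos_head.2.weight" in keys:
--         return "legacy_mlp"
--     return str(default)
-- ===== SOURCE B (Python) =====
-- def infer_pos_head_variant_from_state(state, default="pairwise_residual"):
--     if not isinstance(state, dict):
--         return str(default)
--
--     def rank(k):
--         if k.startswith("pos_head.query_proj."):
--             return 3
--         if k.startswith("pos_head.input_proj."):
--             return 2
--         if k in ("pos_head.0.weight", "pos_head.2.weight"):
--             return 1
--         return 0
--
--     best = max(map(rank, state.keys()), default=0)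
--     return [str(default), "legacy_mlp", "pairwise_residual", "sat_token_heatmap"][best]
-- ===== Notes on version B (the rewrite author's own statement) =====
-- stated objective: alternative
-- what changed: Replaces A's set construction plus three separate short-circuiting category scans with a rank-and-reduce scheme: every key is mapped to a numeric priority rank (3/2/1/0), a single max-reduction finds the highest rank present, and the result is read from a table indexed by that rank.
import Mathlib
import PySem

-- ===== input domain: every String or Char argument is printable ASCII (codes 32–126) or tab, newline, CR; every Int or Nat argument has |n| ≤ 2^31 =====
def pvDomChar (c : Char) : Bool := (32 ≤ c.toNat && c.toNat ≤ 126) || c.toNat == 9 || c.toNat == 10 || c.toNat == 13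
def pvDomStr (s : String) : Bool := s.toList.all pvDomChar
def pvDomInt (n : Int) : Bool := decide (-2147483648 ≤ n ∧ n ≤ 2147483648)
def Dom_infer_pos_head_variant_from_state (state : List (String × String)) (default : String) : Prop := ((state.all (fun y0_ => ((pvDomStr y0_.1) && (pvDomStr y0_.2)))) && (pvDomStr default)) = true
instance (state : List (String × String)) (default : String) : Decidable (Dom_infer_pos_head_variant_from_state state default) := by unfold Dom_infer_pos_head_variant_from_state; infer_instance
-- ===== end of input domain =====

-- B replaces A's set-then-three-category-scans with a rank-and-reduce scheme: each key is
-- mapped to a numeric priority rank, one max-fold finds the highest rank present, and the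
-- answer is a table lookup by that rank; an alternative decomposition (no speed claim).
-- The 'isinstance(state, dict)' guard is always true under the type convention and is dropped.

-- ===== PORT A =====
def infer_pos_head_variant_from_state (state : List (String × String)) (default : String) : String :=
  let keys := PySem.Set.ofList (state.map Prod.fst)
  if keys.any (fun k => PySem.Str.startswith k "pos_head.query_proj.") then "sat_token_heatmap"
  else if keys.any (fun k => PySem.Str.startswith k "pos_head.input_proj.") then "pairwise_residual"
  else if keys.contains "pos_head.0.weight" || keys.contains "pos_head.2.weight" then "legacy_mlp"
  else default

-- ===== PORT B =====
-- rank of a single key (B's helper 'rank')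
def pvRankKey (k : String) : Nat :=
  if PySem.Str.startswith k "pos_head.query_proj." then 3
  else if PySem.Str.startswith k "pos_head.input_proj." then 2
  else if k == "pos_head.0.weight" || k == "pos_head.2.weight" then 1
  else 0

def infer_pos_head_variant_from_state_alt (state : List (String × String)) (default : String) : String :=
  let best := state.foldl (fun m kv => Nat.max m (pvRankKey kv.1)) 0
  ([default, "legacy_mlp", "pairwise_residual", "sat_token_heatmap"].getD best default)

-- ===== PRECONDITION & SPEC =====
def Spec_infer_pos_head_variant_from_state (state : List (String × String)) (default : String) (out : String) : Prop := out = infer_pos_head_variant_from_state_alt state default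
instance (state : List (String × String)) (default : String) (out : String) : Decidable (Spec_infer_pos_head_variant_from_state state default out) := by unfold Spec_infer_pos_head_variant_from_state; infer_instance

-- ===== CLAIM (what is proved, stated in full; the proofs are below) =====
def Claim_equal_infer_pos_head_variant_from_state : Prop := ∀ (state : List (String × String)) (default : String), Dom_infer_pos_head_variant_from_state state default → Spec_infer_pos_head_variant_from_state state default (infer_pos_head_variant_from_state state default)

-- ===== LEMMAS AND PROOFS =====

-- max of two rank-class values combines the category indicators pointwise
theorem max_rankclass (q i l q' i' l' : Bool) :
    Nat.max (if q then 3 else if i then 2 else if l then 1 else 0)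
            (if q' then 3 else if i' then 2 else if l' then 1 else 0)
    = (if (q || q') then 3 else if (i || i') then 2 else if (l || l') then 1 else 0) := by
  revert q i l q' i' l'; decide

-- the max-fold equals the nested-if classification of which categories occur
theorem maxfold_char (state : List (String × String)) :
    state.foldl (fun m kv => Nat.max m (pvRankKey kv.1)) 0
    = (if state.any (fun kv => PySem.Str.startswith kv.1 "pos_head.query_proj.") then 3
       else if state.any (fun kv => PySem.Str.startswith kv.1 "pos_head.input_proj.") then 2
       else if state.any (fun kv => kv.1 == "pos_head.0.weight" || kv.1 == "pos_head.2.weight") then 1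
       else 0) := by
  have h : ∀ (l : List (String × String)) (m : Nat),
      l.foldl (fun m kv => Nat.max m (pvRankKey kv.1)) m
      = Nat.max m (l.foldl (fun m kv => Nat.max m (pvRankKey kv.1)) 0) := by
    intro l
    induction l with
    | nil => intro m; simp
    | cons kv t ih =>
      intro m
      simp only [List.foldl_cons]
      rw [ih, ih (Nat.max 0 _)]
      simp [Nat.max_assoc]
  induction state with
  | nil => simp
  | cons kv t ih =>
    simp only [List.foldl_cons, List.any_cons]
    rw [h, ih]
    simp only [Nat.zero_max]
    unfold pvRankKey
    exact max_rankclass _ _ _ _ _ _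

-- deduplication does not change 'any'
theorem any_ofList {α : Type} [DecidableEq α] (xs : List α) (p : α → Bool) :
    (PySem.Set.ofList xs).any p = xs.any p := by
  rw [Bool.eq_iff_iff]
  simp [List.any_eq_true, PySem.Set.mem_ofList]

theorem contains_ofList (xs : List String) (y : String) :
    (PySem.Set.ofList xs).contains y = xs.contains y := by
  rw [Bool.eq_iff_iff]
  simp [PySem.Set.mem_ofList]

theorem any_map_fst (xs : List (String × String)) (p : String → Bool) :
    (xs.map Prod.fst).any p = xs.any (fun kv => p kv.1) := by
  simp [List.any_map, Function.comp_def]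

-- ===== VERDICT (by name: the statement is the Claim_ definition above) =====
theorem infer_pos_head_variant_from_state_spec : Claim_equal_infer_pos_head_variant_from_state := by
  intro state default _
  unfold Spec_infer_pos_head_variant_from_state infer_pos_head_variant_from_state
    infer_pos_head_variant_from_state_alt
  simp only [any_ofList, contains_ofList, any_map_fst, maxfold_char]
  have h3 : ((state.map Prod.fst).contains "pos_head.0.weight" || (state.map Prod.fst).contains "pos_head.2.weight")
      = state.any (fun kv => kv.1 == "pos_head.0.weight" || kv.1 == "pos_head.2.weight") := by
    rw [Bool.eq_iff_iff]
    simp only [Bool.or_eq_true, List.contains_eq_mem, decide_eq_true_eq, List.mem_map,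
      List.any_eq_true, beq_iff_eq]
    aesop
  rw [h3]
  split_ifs <;> rfl
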